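-- pv_equiv track=rewrite | github.com/xlnwel/grl2-jax | env/overcooked.py | compute_pots_ingradients
-- ===== SOURCE A (Python) =====
-- def compute_pots_ingradients(terrain):
--     pots_pos = []
--     n_pots = 0
--     n_onions = 0
--     n_tomatoes = 0
--     for y, row in enumerate(terrain):
--         for x, i in enumerate(row):
--             if i == 'P':
--                 n_pots += 1
--                 pots_pos.append((x, y))
--             elif i == 'O':
--                 n_onions += 1
--             elif i == 'T':
--                 n_tomatoes += 1
--     assert len(pots_pos) == n_pots
--     return pots_pos, n_pots, n_onions, n_tomatoes
-- ===== SOURCE B (Python) =====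
-- def compute_pots_ingradients(terrain):
--     pots_pos = [(x, y)
--                 for y, row in enumerate(terrain)
--                 for x, i in enumerate(row)
--                 if i == 'P']
--     n_onions = sum(row.count('O') for row in terrain)
--     n_tomatoes = sum(row.count('T') for row in terrain)
--     return pots_pos, len(pots_pos), n_onions, n_tomatoes
-- ===== Notes on version B (the rewrite author's own statement) =====
-- stated objective: idiomatic
-- what changed: Replaces the single combined nested scan with state updates by three independent passes: a flat comprehension collecting pot positions (n_pots = its length) and two count-based sums for onions and tomatoes.
import Mathlib
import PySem

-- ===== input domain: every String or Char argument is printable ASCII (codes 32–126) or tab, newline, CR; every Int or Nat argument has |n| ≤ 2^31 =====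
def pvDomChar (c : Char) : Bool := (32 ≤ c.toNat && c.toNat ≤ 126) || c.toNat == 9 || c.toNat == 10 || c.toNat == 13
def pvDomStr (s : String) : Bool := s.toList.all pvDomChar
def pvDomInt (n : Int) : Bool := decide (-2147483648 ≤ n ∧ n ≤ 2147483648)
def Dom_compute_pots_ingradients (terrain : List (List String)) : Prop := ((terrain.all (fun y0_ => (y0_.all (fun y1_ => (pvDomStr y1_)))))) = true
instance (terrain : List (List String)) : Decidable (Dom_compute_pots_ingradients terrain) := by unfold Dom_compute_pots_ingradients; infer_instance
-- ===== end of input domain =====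

-- B replaces A's single combined nested scan (four mutable accumulators) by three independent
-- passes: a flat comprehension for pot positions and two count-sums; objective: idiomatic.

-- ===== PORT A =====
-- state: (pots_pos, n_pots, n_onions, n_tomatoes)
def pvAStep (y : Int) (st : (List (Int × Int)) × Int × Int × Int) (xi : Int × String) :
    (List (Int × Int)) × Int × Int × Int :=
  if xi.2 = "P" then (st.1 ++ [(xi.1, y)], st.2.1 + 1, st.2.2.1, st.2.2.2)
  else if xi.2 = "O" then (st.1, st.2.1, st.2.2.1 + 1, st.2.2.2)
  else if xi.2 = "T" then (st.1, st.2.1, st.2.2.1, st.2.2.2 + 1)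
  else st

def pvARow (st : (List (Int × Int)) × Int × Int × Int) (yrow : Int × List String) :
    (List (Int × Int)) × Int × Int × Int :=
  (PySem.List.enumerate yrow.2).foldl (pvAStep yrow.1) st

def compute_pots_ingradients (terrain : List (List String)) : (List (Int × Int)) × Int × Int × Int :=
  (PySem.List.enumerate terrain).foldl pvARow ([], 0, 0, 0)

-- ===== PORT B =====
def pvBRow (yrow : Int × List String) : List (Int × Int) :=
  (PySem.List.enumerate yrow.2).filterMap (fun xi => if xi.2 = "P" then some (xi.1, yrow.1) else none)

def compute_pots_ingradients_alt (terrain : List (List String)) : (List (Int × Int)) × Int × Int × Int :=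
  let pots_pos := (PySem.List.enumerate terrain).flatMap pvBRow
  let n_onions : Int := terrain.foldl (fun a row => a + (PySem.List.count row "O" : Int)) 0
  let n_tomatoes : Int := terrain.foldl (fun a row => a + (PySem.List.count row "T" : Int)) 0
  (pots_pos, (pots_pos.length : Int), n_onions, n_tomatoes)

-- ===== PRECONDITION & SPEC =====
def Spec_compute_pots_ingradients (terrain : List (List String)) (out : (List (Int × Int)) × Int × Int × Int) : Prop := out = compute_pots_ingradients_alt terrain
instance (terrain : List (List String)) (out : (List (Int × Int)) × Int × Int × Int) : Decidable (Spec_compute_pots_ingradients terrain out) := by unfold Spec_compute_pots_ingradients; infer_instance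

-- ===== CLAIM (what is proved, stated in full; the proofs are below) =====
def Claim_equal_compute_pots_ingradients : Prop := ∀ (terrain : List (List String)), Dom_compute_pots_ingradients terrain → Spec_compute_pots_ingradients terrain (compute_pots_ingradients terrain)

-- ===== LEMMAS AND PROOFS =====

-- inner loop of A over one row = B's per-row contributions
lemma pvRow_eq (y : Int) (row : List String) : ∀ (s : Int) (st : (List (Int × Int)) × Int × Int × Int),
    (PySem.List.enumerate row s).foldl (pvAStep y) st =
      (st.1 ++ (PySem.List.enumerate row s).filterMap
          (fun xi => if xi.2 = "P" then some (xi.1, y) else none),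
        st.2.1 + (((PySem.List.enumerate row s).filterMap
          (fun xi => if xi.2 = "P" then some (xi.1, y) else none)).length : Int),
        st.2.2.1 + (PySem.List.count row "O" : Int),
        st.2.2.2 + (PySem.List.count row "T" : Int)) := by
  induction row with
  | nil => intro s st; simp [PySem.List.enumerate_nil, PySem.List.count]
  | cons i row ih =>
    intro s st
    rw [PySem.List.enumerate_cons]
    simp only [List.foldl_cons, List.filterMap_cons, ih (s + 1)]
    by_cases hP : i = "P"
    · simp [pvAStep, hP, PySem.List.count_eq]
      ring
    · by_cases hO : i = "O"
      · simp [pvAStep, hO, PySem.List.count_eq]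
        ring
      · by_cases hT : i = "T"
        · simp [pvAStep, hT, PySem.List.count_eq]
          ring
        · simp [pvAStep, hP, hO, hT, PySem.List.count_eq]

-- outer loop of A = B's three passes, starting from any state / any enumerate offset
lemma pvOuter_eq (terrain : List (List String)) : ∀ (s : Int) (st : (List (Int × Int)) × Int × Int × Int),
    (PySem.List.enumerate terrain s).foldl pvARow st =
      (st.1 ++ (PySem.List.enumerate terrain s).flatMap pvBRow,
        st.2.1 + (((PySem.List.enumerate terrain s).flatMap pvBRow).length : Int),
        st.2.2.1 + terrain.foldl (fun a row => a + (PySem.List.count row "O" : Int)) 0,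
        st.2.2.2 + terrain.foldl (fun a row => a + (PySem.List.count row "T" : Int)) 0) := by
  induction terrain with
  | nil => intro s st; simp [PySem.List.enumerate_nil]
  | cons row terrain ih =>
    intro s st
    rw [PySem.List.enumerate_cons]
    simp only [List.foldl_cons, List.flatMap_cons, ih (s + 1)]
    rw [pvARow, pvRow_eq]
    simp only [pvBRow]
    simp only [Prod.mk.injEq, PySem.List.foldl_add, List.length_append, List.append_assoc]
    refine ⟨trivial, by push_cast; ring, by ring, by ring⟩

-- ===== VERDICT (by name: the statement is the Claim_ definition above) =====
theorem compute_pots_ingradients_spec : Claim_equal_compute_pots_ingradients := by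
  intro terrain _
  unfold Spec_compute_pots_ingradients compute_pots_ingradients compute_pots_ingradients_alt
  rw [pvOuter_eq]
  simp
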